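-- pv_equiv track=rewrite | github.com/HappynessI/verl-for-AgentGym | examples/sglang_multiturn/my_exp/legacy/entropy_analysis/entropy_offline_batched.py | build_prefix_for_turn
-- ===== SOURCE A (Python) =====
-- from typing import Dict, List, Optional, Tuple, Any, NamedTuple
--
-- def build_prefix_for_turn(conversations: List[Dict], turn_idx: int, role: str) -> List[Dict]:
--     """构建指定 role 第 turn_idx 个 turn 之前的上下文（不含 target turn 本身）。"""
--     prefix_messages = []
--     role_count = 0
--     for msg in conversations:
--         msg_role = msg.get("role")
--         if msg_role == role:
--             if role_count == turn_idx:
--                 break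
--             role_count += 1
--         prefix_messages.append(msg)
--     return prefix_messages
-- ===== SOURCE B (Python) =====
-- def build_prefix_for_turn(conversations, turn_idx, role):
--     matches = [i for i, msg in enumerate(conversations) if msg.get("role") == role]
--     cutoff = matches[turn_idx] if 0 <= turn_idx < len(matches) else len(conversations)
--     return conversations[:cutoff]
-- ===== Notes on version B (the rewrite author's own statement) =====
-- stated objective: simpler
-- what changed: Replaces the count-while-appending loop with a locate-then-slice decomposition: collect the indices of role occurrences once, pick the turn_idx-th as the cutoff (falling back to len(conversations)), and return a single slice.
import Mathlib
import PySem

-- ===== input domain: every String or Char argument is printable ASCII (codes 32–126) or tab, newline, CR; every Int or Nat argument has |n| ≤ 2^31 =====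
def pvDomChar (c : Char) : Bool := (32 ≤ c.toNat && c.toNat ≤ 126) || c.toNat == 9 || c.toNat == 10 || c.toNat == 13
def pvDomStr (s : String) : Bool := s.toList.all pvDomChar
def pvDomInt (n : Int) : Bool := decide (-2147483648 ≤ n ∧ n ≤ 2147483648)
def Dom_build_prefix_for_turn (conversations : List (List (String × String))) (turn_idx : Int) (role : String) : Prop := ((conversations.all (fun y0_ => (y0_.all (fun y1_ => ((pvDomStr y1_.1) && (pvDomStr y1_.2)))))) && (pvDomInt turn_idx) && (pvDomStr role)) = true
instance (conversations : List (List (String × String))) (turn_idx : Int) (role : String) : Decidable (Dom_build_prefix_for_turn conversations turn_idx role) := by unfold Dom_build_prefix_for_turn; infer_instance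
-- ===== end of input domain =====

-- B replaces A's count-while-appending loop by locate-the-cutoff-then-slice; same cost, simpler shape.

-- ===== PORT A =====
-- the for-loop with break, as structural recursion over (remaining msgs, role_count)
def bp_loop (role : String) (turn_idx : Int) : List (List (String × String)) → Int → List (List (String × String))
  | [], _ => []
  | msg :: rest, cnt =>
    if PySem.Dict.get? (PySem.Dict.mk msg) "role" = some role then
      if cnt = turn_idx then []
      else msg :: bp_loop role turn_idx rest (cnt + 1)
    else msg :: bp_loop role turn_idx rest cnt

def build_prefix_for_turn (conversations : List (List (String × String))) (turn_idx : Int) (role : String) : List (List (String × String)) :=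
  bp_loop role turn_idx conversations 0

-- ===== PORT B =====
-- [i for i, msg in enumerate(conversations) if msg.get("role") == role], with enumerate start s
def bp_matchesFrom (role : String) (s : Int) (convs : List (List (String × String))) : List Int :=
  (PySem.List.enumerate convs s).filterMap
    (fun im => if PySem.Dict.get? (PySem.Dict.mk im.2) "role" = some role then some im.1 else none)

def build_prefix_for_turn_alt (conversations : List (List (String × String))) (turn_idx : Int) (role : String) : List (List (String × String)) :=
  let ms := bp_matchesFrom role 0 conversations
  -- matches[turn_idx] under the guard 0 <= turn_idx < len(matches): getD is exact there
  let cutoff : Int :=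
    if 0 ≤ turn_idx ∧ turn_idx < (ms.length : Int) then ms.getD turn_idx.toNat 0
    else (conversations.length : Int)
  -- conversations[:cutoff] with cutoff = a valid index or len: take is exact (cutoff ≥ 0)
  conversations.take cutoff.toNat

-- ===== PRECONDITION & SPEC =====
def Spec_build_prefix_for_turn (conversations : List (List (String × String))) (turn_idx : Int) (role : String) (out : List (List (String × String))) : Prop := out = build_prefix_for_turn_alt conversations turn_idx role
instance (conversations : List (List (String × String))) (turn_idx : Int) (role : String) (out : List (List (String × String))) : Decidable (Spec_build_prefix_for_turn conversations turn_idx role out) := by unfold Spec_build_prefix_for_turn; infer_instance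

-- ===== CLAIM (what is proved, stated in full; the proofs are below) =====
def Claim_equal_build_prefix_for_turn : Prop := ∀ (conversations : List (List (String × String))) (turn_idx : Int) (role : String), Dom_build_prefix_for_turn conversations turn_idx role → Spec_build_prefix_for_turn conversations turn_idx role (build_prefix_for_turn conversations turn_idx role)

-- ===== LEMMAS AND PROOFS =====

-- the cutoff B computes, with enumerate start s and target index j, as a length to take
def bp_cutF (role : String) (convs : List (List (String × String))) (s j : Int) : Nat :=
  let m := bp_matchesFrom role s convs
  if 0 ≤ j ∧ j < (m.length : Int) then (m.getD j.toNat 0 - s).toNat else convs.length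

theorem bp_matchesFrom_cons (role : String) (s : Int) (msg : List (String × String)) (rest : List (List (String × String))) :
    bp_matchesFrom role s (msg :: rest) =
      (if PySem.Dict.get? (PySem.Dict.mk msg) "role" = some role then [s] else []) ++ bp_matchesFrom role (s + 1) rest := by
  simp only [bp_matchesFrom, PySem.List.enumerate_cons, List.filterMap_cons]
  by_cases h : PySem.Dict.get? (PySem.Dict.mk msg) "role" = some role
  · simp [h]
  · simp [h]

theorem bp_matchesFrom_ge (role : String) (s : Int) (convs : List (List (String × String))) :
    ∀ x ∈ bp_matchesFrom role s convs, s ≤ x := by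
  intro x hx
  simp only [bp_matchesFrom, List.mem_filterMap] at hx
  obtain ⟨⟨i, m⟩, hmem, hf⟩ := hx
  rw [PySem.List.mem_enumerate_iff] at hmem
  obtain ⟨k, hk, heq⟩ := hmem
  by_cases h : PySem.Dict.get? (PySem.Dict.mk m) "role" = some role
  · simp only [h, if_pos] at hf
    cases hf; cases heq; omega
  · simp [h] at hf

theorem bp_getD_mem (m : List Int) (j : Nat) (h : j < m.length) : m.getD j 0 ∈ m := by
  rw [List.getD_eq_getElem m 0 h]; exact List.getElem_mem h

theorem bp_main (role : String) (turn_idx : Int) :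
    ∀ (convs : List (List (String × String))) (s cnt : Int),
      bp_loop role turn_idx convs cnt = convs.take (bp_cutF role convs s (turn_idx - cnt)) := by
  intro convs
  induction convs with
  | nil => intro s cnt; simp [bp_loop, bp_cutF]
  | cons msg rest ih =>
    intro s cnt
    have hge := bp_matchesFrom_ge role (s + 1) rest
    by_cases hp : PySem.Dict.get? (PySem.Dict.mk msg) "role" = some role
    · by_cases hc : cnt = turn_idx
      · subst hc
        simp only [bp_loop, hp, reduceIte]
        simp [bp_cutF, bp_matchesFrom_cons, hp]
      · have hne : ¬ (cnt = turn_idx) := hc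
        simp only [bp_loop, hp, reduceIte, if_neg hne]
        rw [ih (s + 1) (cnt + 1)]
        have : bp_cutF role (msg :: rest) s (turn_idx - cnt)
             = bp_cutF role rest (s + 1) (turn_idx - (cnt + 1)) + 1 := by
          simp only [bp_cutF, bp_matchesFrom_cons, hp, reduceIte, List.singleton_append,
            List.length_cons]
          set m' := bp_matchesFrom role (s + 1) rest with hm'
          set j : Int := turn_idx - cnt with hj
          have hj0 : j ≠ 0 := by omega
          by_cases hr : 0 ≤ j ∧ j < (m'.length : Int) + 1
          · have hj1 : 1 ≤ j := by omega
            have hr' : 0 ≤ turn_idx - (cnt + 1) ∧ turn_idx - (cnt + 1) < (m'.length : Int) := by omega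
            rw [if_pos (by push_cast; omega), if_pos hr']
            have hidx : j.toNat = (turn_idx - (cnt + 1)).toNat + 1 := by omega
            rw [hidx]
            have hlt : (turn_idx - (cnt + 1)).toNat < m'.length := by omega
            have hmem : m'.getD (turn_idx - (cnt + 1)).toNat 0 ∈ m' := bp_getD_mem _ _ hlt
            have hge' := hge _ hmem
            simp only [List.getD_cons_succ]
            omega
          · rw [if_neg (by push_cast at hr ⊢; omega), if_neg (by omega)]
        rw [this, List.take_succ_cons]
    · simp only [bp_loop, if_neg hp]
      rw [ih (s + 1) cnt]
      have : bp_cutF role (msg :: rest) s (turn_idx - cnt)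
           = bp_cutF role rest (s + 1) (turn_idx - cnt) + 1 := by
        simp only [bp_cutF, bp_matchesFrom_cons, hp, reduceIte, List.nil_append, List.length_cons]
        have hone : (msg :: rest).length = rest.length + 1 := rfl
        set m' := bp_matchesFrom role (s + 1) rest with hm'
        set j : Int := turn_idx - cnt with hj
        by_cases hr : 0 ≤ j ∧ j < (m'.length : Int)
        · rw [if_pos hr, if_pos hr]
          have hlt : j.toNat < m'.length := by omega
          have hge' := hge _ (bp_getD_mem _ _ hlt)
          omega
        · rw [if_neg hr, if_neg hr]
      rw [this, List.take_succ_cons]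

-- ===== VERDICT (by name: the statement is the Claim_ definition above) =====
theorem build_prefix_for_turn_spec : Claim_equal_build_prefix_for_turn := by
  intro convs turn_idx role _
  show build_prefix_for_turn convs turn_idx role = build_prefix_for_turn_alt convs turn_idx role
  rw [build_prefix_for_turn, bp_main role turn_idx convs 0 0]
  simp only [build_prefix_for_turn_alt, bp_cutF, sub_zero]
  set m := bp_matchesFrom role 0 convs with hm
  by_cases hr : 0 ≤ turn_idx ∧ turn_idx < (m.length : Int)
  · rw [if_pos hr, if_pos hr]
  · rw [if_neg hr, if_neg hr]
    simp
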